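-- pv_equiv track=rewrite | github.com/terumitu/MentalMapping | devtools/migrate_v1_2_steps_populate.py | _assign_record_status
-- ===== SOURCE A (Python) =====
-- def _assign_record_status(groups: dict) -> dict[int, tuple[str, str]]:
--     """sheet_row -> (record_status, superseded_by) を返す。
--
--     §A.5.4 準拠: グループ内 recorded_at 最新を active、
--     それ以外を superseded（鎖構築: 古いレコードの superseded_by = 次レコードの record_id）。
--     """
--     assignments: dict[int, tuple[str, str]] = {}
--     for key, members in groups.items():
--         if len(members) == 1:
--             sheet_row, _, _ = members[0]
--             assignments[sheet_row] = ("active", "")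
--             continue
--         for i, (sheet_row, _, _) in enumerate(members):
--             if i == len(members) - 1:
--                 assignments[sheet_row] = ("active", "")
--             else:
--                 next_rid = members[i + 1][2]
--                 assignments[sheet_row] = ("superseded", next_rid)
--     return assignments
-- ===== SOURCE B (Python) =====
-- def _assign_record_status(groups: dict) -> dict[int, tuple[str, str]]:
--     """sheet_row -> (record_status, superseded_by), built back-to-front per group."""
--     assignments: dict[int, tuple[str, str]] = {}
--     for members in groups.values():
--         nxt = None
--         rev = []
--         for sheet_row, _, record_id in reversed(members):
--             rev.append((sheet_row, ("active", "") if nxt is None else ("superseded", nxt)))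
--             nxt = record_id
--         assignments.update(reversed(rev))
--     return assignments
-- ===== Notes on version B (the rewrite author's own statement) =====
-- stated objective: alternative
-- what changed: Instead of A's forward enumerate with an i==len-1 test and a single-member special case, B scans each group in reverse carrying the previously seen record_id (no lookahead, no indices, no length arithmetic), collecting the entries back-to-front, and then applies them in one dict update.
import Mathlib
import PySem

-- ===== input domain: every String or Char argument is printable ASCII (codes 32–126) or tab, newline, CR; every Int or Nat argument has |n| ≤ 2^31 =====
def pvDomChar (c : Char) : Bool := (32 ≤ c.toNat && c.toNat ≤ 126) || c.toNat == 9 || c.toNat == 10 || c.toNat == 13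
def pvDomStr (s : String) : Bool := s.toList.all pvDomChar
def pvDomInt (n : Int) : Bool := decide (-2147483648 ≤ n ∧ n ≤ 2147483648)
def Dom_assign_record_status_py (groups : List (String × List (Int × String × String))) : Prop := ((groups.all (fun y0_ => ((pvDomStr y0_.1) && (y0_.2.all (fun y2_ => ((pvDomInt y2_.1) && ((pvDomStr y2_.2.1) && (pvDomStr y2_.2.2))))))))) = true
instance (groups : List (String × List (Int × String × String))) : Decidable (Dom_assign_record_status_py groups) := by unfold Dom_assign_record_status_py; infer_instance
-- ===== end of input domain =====

-- B builds each group's assignments back-to-front: a reversed scan carrying the previous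
-- record_id (no lookahead, no indices, no single-member case), then one dict update (alternative; same cost).


-- ===== PORT A =====
-- one step of A's inner 'for i, (sheet_row, _, _) in enumerate(members)' loop
def pvStepA (members : List (Int × String × String))
    (assignments : PySem.Dict Int (String × String)) (p : Int × Int × String × String) :
    PySem.Dict Int (String × String) :=
  if p.1 == (members.length : Int) - 1 then
    assignments.insert p.2.1 ("active", "")
  else
    -- members[i + 1][2]; in A the index i+1 is always in range here (exact: i < len-1)
    match PySem.List.pyGet? members (p.1 + 1) with
    | some m => assignments.insert p.2.1 ("superseded", m.2.2)
    | none => assignments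

def assign_record_status_py (groups : List (String × List (Int × String × String))) : List (Int × String × String) :=
  (groups.foldl (fun assignments g =>
    let members := g.2
    if members.length == 1 then
      -- sheet_row, _, _ = members[0]; len(members) == 1 so the index is in range (exact)
      match members.head? with
      | some m => assignments.insert m.1 ("active", "")
      | none => assignments
    else
      (PySem.List.enumerate members).foldl (pvStepA members) assignments)
    PySem.Dict.empty).items

-- ===== PORT B =====
-- one step of B's 'for sheet_row, _, record_id in reversed(members)' loop:
-- state = (nxt, rev); appends the entry for this member and carries its record_id
def pvStepB (p : Option String × List (Int × (String × String))) (m : Int × String × String) :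
    Option String × List (Int × (String × String)) :=
  (some m.2.2, p.2 ++ [(m.1, match p.1 with
    | none => ("active", "")
    | some r => ("superseded", r))])

def assign_record_status_py_alt (groups : List (String × List (Int × String × String))) : List (Int × String × String) :=
  (groups.foldl (fun assignments g =>
    let st := g.2.reverse.foldl pvStepB (none, [])
    -- assignments.update(reversed(rev)): sequential inserts of the pairs
    st.2.reverse.foldl (fun d e => d.insert e.1 e.2) assignments)
    PySem.Dict.empty).items

-- ===== PRECONDITION & SPEC =====
def Spec_assign_record_status_py (groups : List (String × List (Int × String × String))) (out : List (Int × String × String)) : Prop := out = assign_record_status_py_alt groups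
instance (groups : List (String × List (Int × String × String))) (out : List (Int × String × String)) : Decidable (Spec_assign_record_status_py groups out) := by unfold Spec_assign_record_status_py; infer_instance

-- ===== CLAIM (what is proved, stated in full; the proofs are below) =====
def Claim_equal_assign_record_status_py : Prop := ∀ (groups : List (String × List (Int × String × String))), Dom_assign_record_status_py groups → Spec_assign_record_status_py groups (assign_record_status_py groups)

-- ===== LEMMAS AND PROOFS =====

-- the common "chain" shape both per-group computations realise
def pvChain (d : PySem.Dict Int (String × String)) :
    List (Int × String × String) → PySem.Dict Int (String × String)
  | [] => d
  | [m] => d.insert m.1 ("active", "")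
  | m :: n :: rest => pvChain (d.insert m.1 ("superseded", n.2.2)) (n :: rest)

-- forward entry list of a group (what A inserts, in order)
def pvEnt : List (Int × String × String) → List (Int × (String × String))
  | [] => []
  | [m] => [(m.1, ("active", ""))]
  | m :: n :: rest => (m.1, ("superseded", n.2.2)) :: pvEnt (n :: rest)

-- what B's reversed scan generates, as a function of the carried nxt
def pvG (nxt : Option String) : List (Int × String × String) → List (Int × (String × String))
  | [] => []
  | m :: t => (m.1, match nxt with
      | none => ("active", "")
      | some r => ("superseded", r)) :: pvG (some m.2.2) t

def pvCarry (nxt : Option String) (l : List (Int × String × String)) : Option String :=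
  l.foldl (fun _ m => some m.2.2) nxt

lemma pvStepB_foldl (l : List (Int × String × String)) (nxt : Option String)
    (rev : List (Int × (String × String))) :
    l.foldl pvStepB (nxt, rev) = (pvCarry nxt l, rev ++ pvG nxt l) := by
  induction l generalizing nxt rev with
  | nil => simp [pvCarry, pvG]
  | cons m t ih => simp [pvStepB, pvCarry, pvG, ih]

lemma pvCarry_append (nxt : Option String) (l : List (Int × String × String))
    (m : Int × String × String) : pvCarry nxt (l ++ [m]) = some m.2.2 := by
  simp [pvCarry, List.foldl_append]

lemma pvG_append (nxt : Option String) (l1 l2 : List (Int × String × String)) :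
    pvG nxt (l1 ++ l2) = pvG nxt l1 ++ pvG (pvCarry nxt l1) l2 := by
  induction l1 generalizing nxt with
  | nil => simp [pvG, pvCarry]
  | cons m t ih => simp [pvG, pvCarry, ih]

lemma pvG_reverse_eq_ent (ms : List (Int × String × String)) :
    pvG none ms.reverse = (pvEnt ms).reverse := by
  induction ms with
  | nil => rfl
  | cons m t ih =>
    cases t with
    | nil => rfl
    | cons n t' =>
      have h : (m :: n :: t').reverse = (n :: t').reverse ++ [m] := by simp
      rw [h, pvG_append, ih]
      rw [show pvCarry none ((n :: t').reverse) = some n.2.2 by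
        simpa using pvCarry_append none t'.reverse n]
      simp [pvEnt, pvG]

lemma pvEnt_foldl_eq_chain (ms : List (Int × String × String))
    (d : PySem.Dict Int (String × String)) :
    (pvEnt ms).foldl (fun d e => d.insert e.1 e.2) d = pvChain d ms := by
  induction ms generalizing d with
  | nil => rfl
  | cons m t ih =>
    cases t with
    | nil => rfl
    | cons n t' => simpa [pvEnt, pvChain] using ih (d := d.insert m.1 ("superseded", n.2.2))

-- B's per-group computation equals pvChain
lemma pvB_group_eq (ms : List (Int × String × String)) (d : PySem.Dict Int (String × String)) :
    (ms.reverse.foldl pvStepB (none, [])).2.reverse.foldl (fun d e => d.insert e.1 e.2) d =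
      pvChain d ms := by
  rw [pvStepB_foldl]
  simp only [List.nil_append]
  rw [pvG_reverse_eq_ent, List.reverse_reverse, pvEnt_foldl_eq_chain]

-- A's per-group computation equals pvChain
lemma pvA_enum_eq_chain (suf pre : List (Int × String × String))
    (d : PySem.Dict Int (String × String)) :
    (PySem.List.enumerate suf (pre.length : Int)).foldl (pvStepA (pre ++ suf)) d =
      pvChain d suf := by
  induction suf generalizing pre d with
  | nil => simp [pvChain, PySem.List.enumerate_nil]
  | cons m rest ih =>
    rw [PySem.List.enumerate_cons, List.foldl_cons]
    have hlen : ((pre.length : Int) + 1) = ((pre ++ [m]).length : Int) := by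
      simp
    have hassoc : pre ++ m :: rest = (pre ++ [m]) ++ rest := by simp
    have hstep : pvStepA (pre ++ m :: rest) d ((pre.length : Int), m) =
        (match rest with
         | [] => d.insert m.1 ("active", "")
         | n :: _ => d.insert m.1 ("superseded", n.2.2)) := by
      cases rest with
      | nil =>
        simp [pvStepA]
      | cons n rest' =>
        have hne : ((pre.length : Int) == ((pre ++ m :: n :: rest').length : Int) - 1) = false := by
          rw [beq_eq_false_iff_ne]
          simp
          omega
        have hget : PySem.List.pyGet? (pre ++ m :: n :: rest') ((pre.length : Int) + 1) = some n := by
          have := PySem.List.pyGet?_append_length (pre := pre ++ [m]) (y := n) (ys := rest')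
          simpa using this
        simp only [pvStepA]
        rw [hne, hget]
        simp
    rw [hstep]
    cases rest with
    | nil => simp [pvChain]
    | cons n rest' =>
      have := ih (pre := pre ++ [m]) (d := d.insert m.1 ("superseded", n.2.2))
      rw [← hassoc, ← hlen] at this
      exact this

lemma pvA_group_eq (members : List (Int × String × String))
    (d : PySem.Dict Int (String × String)) :
    (if members.length == 1 then
      match members.head? with
      | some m => d.insert m.1 ("active", "")
      | none => d
    else
      (PySem.List.enumerate members).foldl (pvStepA members) d) = pvChain d members := by
  by_cases h : members.length = 1
  · match members, h with
    | [m], _ => simp [pvChain]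
  · have h' : (members.length == 1) = false := by simpa using h
    rw [h']
    simpa using pvA_enum_eq_chain members [] d

lemma pvFold_eq (groups : List (String × List (Int × String × String)))
    (d : PySem.Dict Int (String × String)) :
    groups.foldl (fun assignments g =>
      let members := g.2
      if members.length == 1 then
        match members.head? with
        | some m => assignments.insert m.1 ("active", "")
        | none => assignments
      else
        (PySem.List.enumerate members).foldl (pvStepA members) assignments) d =
    groups.foldl (fun assignments g =>
      let st := g.2.reverse.foldl pvStepB (none, [])
      st.2.reverse.foldl (fun d e => d.insert e.1 e.2) assignments) d := by
  induction groups generalizing d with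
  | nil => rfl
  | cons g gs ih =>
    rw [List.foldl_cons, List.foldl_cons, ih]
    congr 1
    rw [pvA_group_eq]
    exact (pvB_group_eq g.2 d).symm

-- ===== VERDICT (by name: the statement is the Claim_ definition above) =====
theorem assign_record_status_py_spec : Claim_equal_assign_record_status_py := by
  intro groups _
  unfold Spec_assign_record_status_py assign_record_status_py assign_record_status_py_alt
  rw [pvFold_eq]
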